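-- pv_equiv track=rewrite | github.com/edt-yxz-zzd/python3_src | nn_ns/math_nn/integer/max_exp.py | max_exp
-- ===== SOURCE A (Python) =====
-- from numbers import Integral
--
-- def divides(q, x):
--     return x%q == 0
--
-- def max_exp(base, x):
--     r'max{e | [base**e\x]}'
--     if not all(isinstance(i, Integral) for i in [base, x]):
--         raise TypeError()
--     if not base >= 2:
--         raise ValueError()
--
--     old_x = x
--     x = abs(x)
--
--     ls = [base]
--     while divides(ls[-1], x):
--         ls.append(ls[-1]**2)
--     ls.pop()
--
--
--     exp = 0
--     while ls:
--         # the last one divides x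
--         #assert divides(ls[-1], x)
--
--         exp += len(ls)
--         x //= ls.pop()
--
--         while ls and not divides(ls[-1], x):
--             ls.pop()
--     assert not divides(base, x)
--
--     assert divides(base**exp, old_x)
--     assert not divides(base**(exp+1), old_x)
--     return exp
-- ===== SOURCE B (Python) =====
-- from numbers import Integral
--
-- def max_exp(base, x):
--     r'max{e | [base**e\x]}'
--     if not all(isinstance(i, Integral) for i in [base, x]):
--         raise TypeError()
--     if not base >= 2:
--         raise ValueError()
--     x = abs(x)
--     exp = 0
--     while x % base == 0:
--         x //= base
--         exp += 1
--     return exp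
-- ===== Notes on version B (the rewrite author's own statement) =====
-- stated objective: simpler
-- what changed: Replaces the squaring-table construction ([base, base^2, base^4, ...]) plus descent-with-trim machinery and internal assertions by a single flat repeated-division loop counting how many times base divides |x|.
-- crash fix: Whenever base >= 2, x != 0 and base^4 divides |x|, A's 'exp += len(ls)' bookkeeping undercounts and its final assertion raises AssertionError, while B returns the true maximal exponent (e.g. max_exp(2,16): A raises AssertionError, B returns 4); A also raises ValueError for base < 2 and loops forever on x == 0, all excluded by Pre_. — e.g. on max_exp(2, 16): A raises AssertionError, B returns 4
import Mathlib
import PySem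

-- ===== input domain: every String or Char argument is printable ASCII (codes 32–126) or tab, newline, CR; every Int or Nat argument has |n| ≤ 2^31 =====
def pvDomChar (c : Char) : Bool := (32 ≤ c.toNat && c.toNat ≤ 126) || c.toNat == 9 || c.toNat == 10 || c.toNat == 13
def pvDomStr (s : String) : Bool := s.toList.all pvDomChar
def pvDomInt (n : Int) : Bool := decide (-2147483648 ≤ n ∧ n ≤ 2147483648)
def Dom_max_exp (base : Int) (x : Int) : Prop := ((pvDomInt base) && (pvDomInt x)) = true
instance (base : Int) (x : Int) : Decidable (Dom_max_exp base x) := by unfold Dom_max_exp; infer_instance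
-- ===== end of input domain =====

-- B replaces A's squaring-table + descent machinery by one flat repeated-division loop (simpler).

-- ===== PORT A =====
-- divides(q, x) = x % q == 0
def pyDivides (q x : Int) : Bool := PySem.Int.mod x q == 0

-- while divides(ls[-1], x): ls.append(ls[-1]**2)
-- (fuel-bounded; the fuel passed below can run out only when x = 0, where Python loops forever — excluded by Pre_)
def maxExpBuild (fuel : Nat) (x : Int) (ls : List Int) : List Int :=
  match fuel with
  | 0 => ls
  | f+1 =>
    match ls.getLast? with
    | none => ls
    | some l => if pyDivides l x then maxExpBuild f x (ls ++ [l^2]) else ls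

-- inner loop: while ls and not divides(ls[-1], x): ls.pop()
def maxExpTrim (x : Int) (ls : List Int) : List Int :=
  if h : ls = [] then ls
  else if pyDivides (ls.getLast h) x then ls
  else maxExpTrim x ls.dropLast
termination_by ls.length
decreasing_by
  have hpos : 0 < ls.length := List.length_pos_iff.mpr h
  simp [List.length_dropLast]; omega

theorem maxExpTrim_length_le (x : Int) (ls : List Int) : (maxExpTrim x ls).length ≤ ls.length := by
  fun_induction maxExpTrim x ls with
  | case1 => exact le_rfl
  | case2 => exact le_rfl
  | case3 ls h hdvd ih =>
      refine ih.trans ?_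
      simp [List.length_dropLast]

-- outer loop: while ls: exp += len(ls); x //= ls.pop(); <inner loop>
def maxExpDescend (x : Int) (ls : List Int) (exp : Int) : Int :=
  if h : ls = [] then exp
  else
    let exp' := exp + (ls.length : Int)
    let x' := PySem.Int.floordiv x (ls.getLast h)
    maxExpDescend x' (maxExpTrim x' ls.dropLast) exp'
termination_by ls.length
decreasing_by
  have hpos : 0 < ls.length := List.length_pos_iff.mpr h
  have := maxExpTrim_length_le (PySem.Int.floordiv x (ls.getLast h)) ls.dropLast
  simp [List.length_dropLast] at this ⊢
  omega

-- TypeError branch is vacuous for Int arguments; base < 2 raises ValueError in Python (excluded by Pre_,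
-- the port returns a dummy 0 there).  A's trailing asserts raise exactly on the Raises_ region (outside Pre_),
-- so they are not modelled; on Pre_ they pass and change nothing.
def max_exp (base : Int) (x : Int) : Int :=
  if base < 2 then 0
  else
    let x1 := |x|
    let ls := maxExpBuild (x1.natAbs + 1) x1 [base]
    maxExpDescend x1 ls.dropLast 0

-- ===== PORT B =====
-- exp = 0; while x % base == 0: x //= base; exp += 1
-- (fuel-bounded; the fuel can run out only when x = 0, where Python loops forever — excluded by Pre_)
def maxExpAltLoop (fuel : Nat) (base : Int) (x : Int) (exp : Int) : Int :=
  match fuel with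
  | 0 => exp
  | f+1 =>
    if PySem.Int.mod x base == 0 then maxExpAltLoop f base (PySem.Int.floordiv x base) (exp + 1)
    else exp

def max_exp_alt (base : Int) (x : Int) : Int :=
  if base < 2 then 0
  else maxExpAltLoop ((|x|).natAbs + 1) base |x| 0

-- ===== PRECONDITION & SPEC =====
-- Pre_ excludes only non-returning inputs of A: base < 2 (ValueError), x = 0 (infinite loop),
-- and base^4 ∣ x, where A's own final assertion fails (AssertionError) because 'exp += len(ls)' undercounts.
def Pre_max_exp (base : Int) (x : Int) : Prop := 2 ≤ base ∧ x ≠ 0 ∧ ¬ (base^4 ∣ x)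
instance (base : Int) (x : Int) : Decidable (Pre_max_exp base x) := by unfold Pre_max_exp; infer_instance
def pvWitness_max_exp : Int × Int := (2, 24)

-- Whenever base ≥ 2, x ≠ 0 and base^4 divides x, A raises AssertionError while B returns the true maximal exponent.
def Raises_max_exp (base : Int) (x : Int) : Prop := 2 ≤ base ∧ x ≠ 0 ∧ (base^4 ∣ x)
instance (base : Int) (x : Int) : Decidable (Raises_max_exp base x) := by unfold Raises_max_exp; infer_instance
def pvRaiseWitness_max_exp : Int × Int := (2, 16)
def pvRaiseWitnessOut_max_exp : Int := 4

def Spec_max_exp (base : Int) (x : Int) (out : Int) : Prop := out = max_exp_alt base x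
instance (base : Int) (x : Int) (out : Int) : Decidable (Spec_max_exp base x out) := by unfold Spec_max_exp; infer_instance

-- ===== CLAIM (what is proved, stated in full; the proofs are below) =====
def Claim_equal_max_exp : Prop := ∀ (base : Int) (x : Int), Dom_max_exp base x → Pre_max_exp base x → Spec_max_exp base x (max_exp base x)
def Claim_raises_max_exp : Prop := (∀ (base : Int) (x : Int), Dom_max_exp base x → Raises_max_exp base x → ¬ Pre_max_exp base x) ∧ (Dom_max_exp (pvRaiseWitness_max_exp.1) (pvRaiseWitness_max_exp.2) ∧ Raises_max_exp (pvRaiseWitness_max_exp.1) (pvRaiseWitness_max_exp.2) ∧ max_exp_alt (pvRaiseWitness_max_exp.1) (pvRaiseWitness_max_exp.2) = pvRaiseWitnessOut_max_exp)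

-- ===== LEMMAS AND PROOFS =====

theorem pyDivides_true {q y : Int} (h : q ∣ y) : pyDivides q y = true := by
  simp [pyDivides, PySem.Int.mod_eq_zero_iff_dvd, h]

theorem pyDivides_false {q y : Int} (h : ¬ q ∣ y) : pyDivides q y = false := by
  simp [pyDivides, PySem.Int.mod_eq_zero_iff_dvd, h]

-- division facts: for positive exact division, positivity and a divisor-transfer rule
theorem div_fact (d y a : Int) (hd : 0 < d) (hy : 0 < y) (h : d ∣ y) :
    0 < y / d ∧ (a ∣ y / d ↔ a * d ∣ y) := by
  obtain ⟨c, rfl⟩ := h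
  rw [Int.mul_ediv_cancel_left _ hd.ne']
  constructor
  · by_contra hc
    push Not at hc
    nlinarith
  · constructor
    · rintro ⟨k, rfl⟩; exact ⟨k, by ring⟩
    · rintro ⟨k, hk⟩
      refine ⟨k, mul_left_cancel₀ hd.ne' ?_⟩
      rw [hk]; ring

theorem altLoop_stop (f : Nat) (b y e : Int) (h : ¬ b ∣ y) :
    maxExpAltLoop (f+1) b y e = e := by
  simp [maxExpAltLoop, PySem.Int.mod_eq_zero_iff_dvd, h]

theorem altLoop_step (f : Nat) (b y e : Int) (h : b ∣ y) :
    maxExpAltLoop (f+1) b y e = maxExpAltLoop f b (PySem.Int.floordiv y b) (e + 1) := by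
  simp [maxExpAltLoop, PySem.Int.mod_eq_zero_iff_dvd, h]

-- evaluation of A's first loop on the shapes Pre_ admits
theorem build0 (f : Nat) (b y : Int) (h1 : ¬ b ∣ y) :
    maxExpBuild (f+1) y [b] = [b] := by
  simp [maxExpBuild, pyDivides_false h1]

theorem build1 (f : Nat) (b y : Int) (h1 : b ∣ y) (h2 : ¬ b^2 ∣ y) :
    maxExpBuild (f+1+1) y [b] = [b, b^2] := by
  simp [maxExpBuild, pyDivides_true h1, pyDivides_false h2]

theorem build2 (f : Nat) (b y : Int) (h1 : b ∣ y) (h2 : b^2 ∣ y) (h4 : ¬ b^4 ∣ y) :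
    maxExpBuild (f+1+1+1) y [b] = [b, b^2, b^4] := by
  have hsq : ((b^2)^2) = b^4 := by ring
  simp [maxExpBuild, pyDivides_true h1, pyDivides_true h2, hsq, pyDivides_false h4]

-- evaluation of A's inner and outer loops on short lists
theorem trim_nil (x : Int) : maxExpTrim x [] = [] := by
  rw [maxExpTrim]; simp

theorem trim1_true (x b : Int) (h : b ∣ x) : maxExpTrim x [b] = [b] := by
  rw [maxExpTrim]; simp [pyDivides_true h]

theorem trim1_false (x b : Int) (h : ¬ b ∣ x) : maxExpTrim x [b] = [] := by
  rw [maxExpTrim]; simp [pyDivides_false h, trim_nil]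

theorem descend_nil (x e : Int) : maxExpDescend x [] e = e := by
  rw [maxExpDescend]; simp

theorem descend1 (x b e : Int) : maxExpDescend x [b] e = e + 1 := by
  rw [maxExpDescend]; simp [trim_nil, descend_nil]

theorem descend2 (x b e : Int) :
    maxExpDescend x [b, b^2] e =
      (if b ∣ PySem.Int.floordiv x (b^2) then e + 2 + 1 else e + 2) := by
  rw [maxExpDescend]
  by_cases h : b ∣ PySem.Int.floordiv x (b^2)
  · simp [trim1_true _ _ h, descend1, h]
  · simp [trim1_false _ _ h, descend_nil, h]

-- one exact-division step: floordiv is '/', the quotient is positive, divisors transfer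
theorem step_data (b y : Int) (hb : 0 < b) (hy : 0 < y) (h : b ∣ y) :
    PySem.Int.floordiv y b = y / b ∧ 0 < y / b ∧ ∀ a : Int, (a ∣ y / b ↔ a * b ∣ y) := by
  refine ⟨PySem.Int.floordiv_eq_ediv_of_pos hb, ?_, ?_⟩
  · exact (div_fact b y 0 hb hy h).1
  · exact fun a => (div_fact b y a hb hy h).2

-- ===== VERDICT (by name: the statement is the Claim_ definition above) =====
theorem max_exp_spec : Claim_equal_max_exp := by
  intro base x _ hpre
  obtain ⟨hb, hx, hnd⟩ := hpre
  have hb0 : (0:Int) < base := by omega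
  have hblt : ¬ base < 2 := by omega
  unfold Spec_max_exp max_exp max_exp_alt
  simp only [if_neg hblt]
  set y := |x| with hydef
  have hy0 : 0 < y := abs_pos.mpr hx
  have hnd4 : ¬ base^4 ∣ y := by rw [hydef, dvd_abs]; exact hnd
  by_cases h1 : base ∣ y
  · obtain ⟨hq1, hp1, hd1⟩ := step_data base y hb0 hy0 h1
    by_cases h2 : base^2 ∣ y
    · -- e ∈ {2, 3}: the table is [base, base², base⁴]
      have hby : base^2 ≤ y := Int.le_of_dvd hy0 h2
      have hb4 : (4:Int) ≤ base^2 := by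
        calc (4:Int) = 2^2 := by norm_num
          _ ≤ base^2 := by gcongr
      obtain ⟨m, hm⟩ : ∃ m, y.natAbs + 1 = m+1+1+1+1 := ⟨y.natAbs - 3, by omega⟩
      rw [hm, build2 (m+1) base y h1 h2 hnd4]
      have hdl : ([base, base^2, base^4] : List Int).dropLast = [base, base^2] := rfl
      rw [hdl, descend2]
      have h2' : base ∣ y / base := (hd1 base).mpr (by rwa [← pow_two])
      obtain ⟨hq2, hp2, hd2⟩ := step_data base (y / base) hb0 hp1 h2'
      have hA : PySem.Int.floordiv y (base^2) = y / base / base := by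
        rw [PySem.Int.floordiv_eq_ediv_of_pos (by positivity : (0:Int) < base^2),
            pow_two, ← Int.ediv_ediv_of_nonneg hb0.le]
      have h3iff : base ∣ y / base / base ↔ base^3 ∣ y := by
        rw [hd2 base, hd1 (base * base),
            show base * base * base = base^3 from by ring]
      rw [hA, altLoop_step _ _ _ _ h1, hq1, altLoop_step _ _ _ _ h2', hq2]
      by_cases h3 : base^3 ∣ y
      · have hlast : base ∣ y / base / base := h3iff.mpr h3
        obtain ⟨hq3, hp3, hd3⟩ := step_data base (y / base / base) hb0 hp2 hlast
        have hstop : ¬ base ∣ y / base / base / base := by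
          intro h
          apply hnd4
          have h4 := (hd1 _).mp ((hd2 _).mp ((hd3 base).mp h))
          rwa [show base * base * base * base = base^4 from by ring] at h4
        rw [if_pos hlast, altLoop_step _ _ _ _ hlast, hq3, altLoop_stop _ _ _ _ hstop]
        norm_num
      · have hlast : ¬ base ∣ y / base / base := fun h => h3 (h3iff.mp h)
        rw [if_neg hlast, altLoop_stop _ _ _ _ hlast]
        norm_num
    · -- e = 1: the table is [base, base²]
      have hby : base ≤ y := Int.le_of_dvd hy0 h1
      obtain ⟨m, hm⟩ : ∃ m, y.natAbs + 1 = m+1+1 := ⟨y.natAbs - 1, by omega⟩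
      rw [hm, build1 m base y h1 h2]
      have hdl : ([base, base^2] : List Int).dropLast = [base] := rfl
      have hstop : ¬ base ∣ y / base := by
        intro h
        exact h2 (by rw [pow_two]; exact (hd1 base).mp h)
      rw [hdl, descend1, altLoop_step _ _ _ _ h1, hq1, altLoop_stop _ _ _ _ hstop]
  · -- e = 0: the table is empty
    obtain ⟨m, hm⟩ : ∃ m, y.natAbs + 1 = m+1 := ⟨y.natAbs, by omega⟩
    rw [hm, build0 m base y h1, altLoop_stop _ _ _ _ h1]
    simp [descend_nil]

@[simp] theorem max_exp_raises : Claim_raises_max_exp := by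
  unfold Claim_raises_max_exp
  constructor
  · rintro base x _ ⟨hb, hx, hd⟩ ⟨_, _, hnd⟩; exact hnd hd
  · exact ⟨by decide, by decide, by decide⟩
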